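-- pv_equiv track=rewrite | github.com/newinnovations/aoc | 2022/25/aoc-2022-25a.py | dec_snafu
-- ===== SOURCE A (Python) =====
-- def dec_snafu(dec):
--     if dec == 0:
--         return "0"
--     digits = ""
--     while dec:
--         d = int(dec % 5)
--         if d > 2:
--             d = d - 5
--         digits += "012=-"[d]
--         dec = (dec - d) // 5
--     return digits[::-1]
-- ===== SOURCE B (Python) =====
-- def dec_snafu(dec):
--     def go(n):
--         if n == 0:
--             return ""
--         q, r = divmod(n + 2, 5)
--         return go(q) + "=-012"[r]
--     return go(dec) or "0"
-- ===== Notes on version B (the rewrite author's own statement) =====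
-- stated objective: alternative
-- what changed: B recurses most-significant digit first, taking divmod of a shifted value so the digit indexes the reversed table directly (no signed-digit adjustment branch and no string reversal), instead of A's least-significant-first while loop with an adjustment branch and a final reversal.
import Mathlib
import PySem

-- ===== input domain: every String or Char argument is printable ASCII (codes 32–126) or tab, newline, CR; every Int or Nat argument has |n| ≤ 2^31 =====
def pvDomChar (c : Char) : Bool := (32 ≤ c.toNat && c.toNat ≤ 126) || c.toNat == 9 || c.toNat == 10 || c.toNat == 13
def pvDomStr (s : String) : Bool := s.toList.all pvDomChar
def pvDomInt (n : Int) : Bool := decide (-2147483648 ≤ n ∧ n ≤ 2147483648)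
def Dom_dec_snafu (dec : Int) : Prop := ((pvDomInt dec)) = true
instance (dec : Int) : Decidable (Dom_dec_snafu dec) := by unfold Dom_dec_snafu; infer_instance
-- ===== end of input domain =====

-- B recurses most-significant digit first via divmod(n+2,5) and the table "=-012",
-- replacing A's least-significant-first accumulation with a signed-digit branch and a final reversal
-- (objective: alternative decomposition, same cost).


-- ===== PORT A =====
-- A's while loop: appends "012=-"[d] (Python negative indexing, exact via pyGet?) least-significant
-- first, then the result is reversed.  Fuel-structural recursion: |dec| strictly decreases each
-- iteration, so fuel = dec.natAbs + 1 always reaches dec = 0 — the fuel only makes the loop total.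
def snafuLoop : Nat → Int → List Char → List Char
  | 0, _, digits => digits
  | fuel + 1, dec, digits =>
    if dec = 0 then digits
    else
      let d0 := PySem.Int.mod dec 5
      let d := if d0 > 2 then d0 - 5 else d0
      snafuLoop fuel (PySem.Int.floordiv (dec - d) 5)
        (digits ++ [(PySem.List.pyGet? "012=-".toList d).getD '?'])

def dec_snafu (dec : Int) : String :=
  if dec = 0 then "0"
  else String.ofList (snafuLoop (dec.natAbs + 1) dec []).reverse

-- ===== PORT B =====
-- B's go: q, r = divmod(n+2, 5); go(q) + "=-012"[r].  Same fuel guard for totality.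
def snafuGo : Nat → Int → List Char
  | 0, _ => []
  | fuel + 1, n =>
    if n = 0 then []
    else
      let q := PySem.Int.floordiv (n + 2) 5
      let r := PySem.Int.mod (n + 2) 5
      snafuGo fuel q ++ [(PySem.List.pyGet? "=-012".toList r).getD '?']

-- 'go(dec) or "0"': the empty string is falsy in Python.
def dec_snafu_alt (dec : Int) : String :=
  let s := String.ofList (snafuGo (dec.natAbs + 1) dec)
  if s = "" then "0" else s

-- ===== PRECONDITION & SPEC =====
def Spec_dec_snafu (dec : Int) (out : String) : Prop := out = dec_snafu_alt dec
instance (dec : Int) (out : String) : Decidable (Spec_dec_snafu dec out) := by unfold Spec_dec_snafu; infer_instance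

-- ===== CLAIM (what is proved, stated in full; the proofs are below) =====
def Claim_equal_dec_snafu : Prop := ∀ (dec : Int), Dom_dec_snafu dec → Spec_dec_snafu dec (dec_snafu dec)

-- ===== LEMMAS AND PROOFS =====

-- One step of A's loop equals one step of B's recursion: same next value, same character.
lemma step_next (n : Int) :
    PySem.Int.floordiv (n + 2) 5 =
      PySem.Int.floordiv (n - (if PySem.Int.mod n 5 > 2 then PySem.Int.mod n 5 - 5 else PySem.Int.mod n 5)) 5 := by
  rw [PySem.Int.floordiv_eq_ediv_of_pos (by norm_num), PySem.Int.floordiv_eq_ediv_of_pos (by norm_num),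
      PySem.Int.mod_eq_emod_of_pos (by norm_num)]
  split <;> omega

lemma step_char (n : Int) :
    (PySem.List.pyGet? "=-012".toList (PySem.Int.mod (n + 2) 5)).getD '?' =
      (PySem.List.pyGet? "012=-".toList
        (if PySem.Int.mod n 5 > 2 then PySem.Int.mod n 5 - 5 else PySem.Int.mod n 5)).getD '?' := by
  rw [PySem.Int.mod_eq_emod_of_pos (by norm_num), PySem.Int.mod_eq_emod_of_pos (by norm_num)]
  have h0 : 0 ≤ n % 5 := Int.emod_nonneg n (by norm_num)
  have h5 : n % 5 < 5 := Int.emod_lt_of_pos n (by norm_num)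
  have h2 : (n + 2) % 5 = (n % 5 + 2) % 5 := by omega
  rw [h2]
  interval_cases h : n % 5 <;> decide

lemma snafuLoop_eq (fuel : Nat) (dec : Int) (digits : List Char) :
    snafuLoop fuel dec digits = digits ++ (snafuGo fuel dec).reverse := by
  induction fuel generalizing dec digits with
  | zero => simp [snafuLoop, snafuGo]
  | succ fuel ih =>
    rw [snafuLoop, snafuGo]
    split
    · simp
    · rw [ih, ← step_next, ← step_char]
      simp

lemma snafuGo_ne_nil (fuel : Nat) (dec : Int) (h : dec ≠ 0) :
    snafuGo (fuel + 1) dec ≠ [] := by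
  rw [snafuGo]
  simp [h]

-- ===== VERDICT (by name: the statement is the Claim_ definition above) =====
theorem dec_snafu_spec : Claim_equal_dec_snafu := by
  intro dec _
  unfold Spec_dec_snafu dec_snafu dec_snafu_alt
  by_cases h : dec = 0
  · simp [h, snafuGo]
  · have hne := snafuGo_ne_nil dec.natAbs dec h
    have hs : String.ofList (snafuGo (dec.natAbs + 1) dec) ≠ "" := by
      intro hh
      apply hne
      have h2 := congrArg String.toList hh
      rwa [String.toList_ofList] at h2
    simp [h, snafuLoop_eq, hs]
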